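-- pv_equiv track=rewrite | github.com/erikmoura/trabalho-IA | tecnica-classica.py | busca_a_estrela_bfs
-- ===== SOURCE A (Python) =====
-- import heapq
--
-- def busca_a_estrela_bfs(no_inicial, grafo, profundidade_max):
--     # fila de prioridade: (f(n), g(n), no_atual)
--     # f(n) = g(n) + h(n), onde:
--     #   g(n) = profundidade atual
--     #   h(n) = profundidade_max - profundidade atual
--     fila = [(0 + (profundidade_max - 0), 0, no_inicial)]
--     visitados = {}
--     resultado = set()
--
--     while fila:
--         f, g, no_atual = heapq.heappop(fila)
--
--         # ignorar se já visitamos este nó com menor custo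
--         if no_atual in visitados and visitados[no_atual] <= g:
--             continue
--
--         visitados[no_atual] = g
--
--         if g == profundidade_max:
--             resultado.add(no_atual)
--             continue
--
--         for vizinho in grafo.get(no_atual, []):
--             novo_g = g + 1
--             h = profundidade_max - novo_g
--             f = novo_g + h
--             heapq.heappush(fila, (f, novo_g, vizinho))
--
--     return list(resultado)
-- ===== SOURCE B (Python) =====
-- def busca_a_estrela_bfs(no_inicial, grafo, profundidade_max):
--     # Level-synchronous BFS: expand whole depth levels at once (no heap, no per-node costs);
--     # at the level whose depth equals profundidade_max, return that frontier sorted.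
--     visitados = {no_inicial}
--     fronteira = [no_inicial]
--     profundidade = 0
--     while fronteira:
--         if profundidade == profundidade_max:
--             return sorted(fronteira)
--         proxima = []
--         for u in fronteira:
--             for v in grafo.get(u, []):
--                 if v not in visitados:
--                     visitados.add(v)
--                     proxima.append(v)
--         fronteira = proxima
--         profundidade += 1
--     return []
-- ===== Notes on version B (the rewrite author's own statement) =====
-- stated objective: simpler
-- what changed: A's heap-based 'A*' (whose priority f = g + (profundidade_max - g) is constant, so the heap is just a priority queue by depth, with per-node visited costs and results collected inline during the search) is replaced by a plain level-synchronous BFS that keeps a visited set and expands one whole frontier per depth step, returning sorted(fronteira) when the depth counter equals profundidade_max; the returned list is compared as a set (A returns list(set) in hash order).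
import Mathlib
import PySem

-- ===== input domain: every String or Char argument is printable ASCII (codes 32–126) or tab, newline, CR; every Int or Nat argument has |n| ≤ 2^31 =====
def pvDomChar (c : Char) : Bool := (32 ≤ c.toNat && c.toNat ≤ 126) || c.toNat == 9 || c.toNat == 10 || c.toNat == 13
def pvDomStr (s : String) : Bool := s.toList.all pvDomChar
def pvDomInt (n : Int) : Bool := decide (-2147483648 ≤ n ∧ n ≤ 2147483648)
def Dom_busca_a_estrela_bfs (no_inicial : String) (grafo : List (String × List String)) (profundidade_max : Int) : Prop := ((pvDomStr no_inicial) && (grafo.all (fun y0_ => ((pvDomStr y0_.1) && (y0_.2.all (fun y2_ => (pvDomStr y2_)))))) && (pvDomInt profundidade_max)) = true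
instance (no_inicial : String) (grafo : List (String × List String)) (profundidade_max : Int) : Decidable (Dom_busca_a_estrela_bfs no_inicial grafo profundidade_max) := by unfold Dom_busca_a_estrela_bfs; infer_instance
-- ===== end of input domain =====

-- B replaces A's heap-based search (whose priority f is constantly profundidade_max, making it a
-- priority-queue BFS by depth) with a plain level-synchronous BFS over whole frontiers; objective: simpler.
-- A's Python returns list(resultado) of a set, whose iteration order is CPython hash order (the task
-- compares the returned list as a SET); the Lean ports both return that set in ascending string order.

-- ===== PORT A =====
-- grafo.get(no_atual, [])
def pvAdj (grafo : List (String × List String)) (u : String) : List String :=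
  (PySem.Dict.mk grafo).getD u []

-- Python tuple comparison (f, g, node) ≤ (f', g', node'); Python str ≤ is code-point
-- lexicographic = Lean's ≤ on toList (String's own ≤ is kernel-opaque).
def pvEntLe (a b : Int × Int × String) : Bool :=
  a.1 < b.1 || (a.1 == b.1 && (a.2.1 < b.2.1 || (a.2.1 == b.2.1 && a.2.2.toList ≤ b.2.2.toList)))

-- heapq.heappush: the heap is kept as a list sorted by the Python tuple order, so that
-- heapq.heappop = take the head = the minimum element; exact (equal tuples are identical values).
def pvHeapPush (h : List (Int × Int × String)) (e : Int × Int × String) : List (Int × Int × String) :=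
  match h with
  | [] => [e]
  | x :: t => if pvEntLe x e then x :: pvHeapPush t e else e :: x :: t

-- the 'while fila:' loop; fuel only makes the recursion total (each iteration pops one entry;
-- the pop count is bounded by 2 + the total number of neighbours, see pvLoopA_bound below).
def pvLoopA (grafo : List (String × List String)) (pm : Int) :
    Nat → List (Int × Int × String) → PySem.Dict String Int → PySem.Set String → List String
  | 0, _, _, res => res
  | _ + 1, [], _, res => res
  | fuel + 1, (_, g, no_atual) :: fila, vis, res =>
      let skip := match vis.get? no_atual with
        | some gv => decide (gv ≤ g)
        | none => false
      if skip then pvLoopA grafo pm fuel fila vis res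
      else
        let vis' := vis.insert no_atual g
        if g == pm then pvLoopA grafo pm fuel fila vis' (PySem.Set.add res no_atual)
        else
          pvLoopA grafo pm fuel
            ((pvAdj grafo no_atual).foldl (fun h v =>
              let novo_g := g + 1
              let hh := pm - novo_g
              let ff := novo_g + hh
              pvHeapPush h (ff, novo_g, v)) fila) vis' res

def busca_a_estrela_bfs (no_inicial : String) (grafo : List (String × List String)) (profundidade_max : Int) : List String :=
  pvLoopA grafo profundidade_max ((grafo.map (fun p => p.2.length)).sum + 2)
    [(0 + (profundidade_max - 0), 0, no_inicial)] PySem.Dict.empty PySem.Set.empty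

-- ===== PORT B =====
-- the 'while fronteira:' loop of Source B; fuel only makes the recursion total (every non-final round
-- adds at least one new node to visitados, so rounds are bounded by 2 + total number of neighbours).
def pvLoopB (grafo : List (String × List String)) (pm : Int) :
    Nat → List String → PySem.Set String → Int → List String
  | 0, _, _, _ => []
  | fuel + 1, fronteira, vis, d =>
      match fronteira with
      | [] => []
      | _ :: _ =>
        if d == pm then PySem.List.sorted fronteira (fun x => x.toList) false  -- sorted(fronteira): Python str order = toList order
        else
          let st := fronteira.foldl (fun (st : PySem.Set String × List String) u =>
              (pvAdj grafo u).foldl (fun st v =>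
                if PySem.Set.contains st.1 v then st
                else (PySem.Set.add st.1 v, st.2 ++ [v])) st) (vis, [])
          pvLoopB grafo pm fuel st.2 st.1 (d + 1)

def busca_a_estrela_bfs_alt (no_inicial : String) (grafo : List (String × List String)) (profundidade_max : Int) : List String :=
  pvLoopB grafo profundidade_max ((grafo.map (fun p => p.2.length)).sum + 2)
    [no_inicial] (PySem.Set.add PySem.Set.empty no_inicial) 0

-- ===== PRECONDITION & SPEC =====
def Spec_busca_a_estrela_bfs (no_inicial : String) (grafo : List (String × List String)) (profundidade_max : Int) (out : List String) : Prop := out = busca_a_estrela_bfs_alt no_inicial grafo profundidade_max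
instance (no_inicial : String) (grafo : List (String × List String)) (profundidade_max : Int) (out : List String) : Decidable (Spec_busca_a_estrela_bfs no_inicial grafo profundidade_max out) := by unfold Spec_busca_a_estrela_bfs; infer_instance

-- ===== CLAIM (what is proved, stated in full; the proofs are below) =====
def Claim_equal_busca_a_estrela_bfs : Prop := ∀ (no_inicial : String) (grafo : List (String × List String)) (profundidade_max : Int), Dom_busca_a_estrela_bfs no_inicial grafo profundidade_max → Spec_busca_a_estrela_bfs no_inicial grafo profundidade_max (busca_a_estrela_bfs no_inicial grafo profundidade_max)

-- ===== LEMMAS AND PROOFS =====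

-- ---- proof-side definitions ----

-- all node names a heap entry / frontier can ever carry
def pvU (grafo : List (String × List String)) (ni : String) : List String :=
  ni :: grafo.flatMap (fun p => p.2)

-- remaining expansion work: total degree of the not-yet-visited universe
def pvRest (grafo : List (String × List String)) (ni : String) (V : PySem.Dict String Int) : Nat :=
  (((pvU grafo ni).dedup.filter (fun u => !(V.contains u))).map (fun u => (pvAdj grafo u).length)).sum

def pvPotA (grafo : List (String × List String)) (ni : String) (V : PySem.Dict String Int)
    (S : List (Int × Int × String)) : Nat := S.length + pvRest grafo ni V

-- "the A loop from this state returns out, for every sufficient fuel"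
def pvRunsA (grafo : List (String × List String)) (ni : String) (pm : Int)
    (S : List (Int × Int × String)) (V : PySem.Dict String Int) (res : PySem.Set String)
    (out : List String) : Prop :=
  ∀ fuel, pvPotA grafo ni V S ≤ fuel → pvLoopA grafo pm fuel S V res = out

def pvCntB (grafo : List (String × List String)) (ni : String) (vis : PySem.Set String) : Nat :=
  ((pvU grafo ni).dedup.filter (fun u => !(PySem.Set.contains vis u))).length

def pvPotB (grafo : List (String × List String)) (ni : String) (vis : PySem.Set String) : Nat :=
  2 + pvCntB grafo ni vis

-- "the B loop from this state returns out, for every sufficient fuel"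
def pvRunsB (grafo : List (String × List String)) (ni : String) (pm : Int)
    (F : List String) (vis : PySem.Set String) (d : Int) (out : List String) : Prop :=
  ∀ fuel, pvPotB grafo ni vis ≤ fuel → pvLoopB grafo pm fuel F vis d = out

def pvEnt (pm d : Int) (u : String) : Int × Int × String := (pm, d, u)

-- name-level image of heappush among entries with equal (f, g) components
def pvInsStr (P : List String) (v : String) : List String :=
  match P with
  | [] => [v]
  | x :: t => if x.toList ≤ v.toList then x :: pvInsStr t v else v :: x :: t

def pvPushNames (P : List String) (l : List String) : List String := l.foldl pvInsStr P

-- one whole round of A at depth d (d ≠ pm): (visited-after, names pushed for depth d+1)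
def pvRound (grafo : List (String × List String)) (d : Int) :
    List String → PySem.Dict String Int → List String → PySem.Dict String Int × List String
  | [], V, P => (V, P)
  | u :: t, V, P =>
      if V.contains u then pvRound grafo d t V P
      else pvRound grafo d t (V.insert u d) (pvPushNames P (pvAdj grafo u))

-- the final round of A at depth pm: emits each fresh name once, in list order
def pvEmit (pm : Int) : List String → PySem.Dict String Int → List String → List String
  | [], _, res => res
  | u :: t, V, res =>
      if V.contains u then pvEmit pm t V res
      else pvEmit pm t (V.insert u pm) (res ++ [u])

-- the B loop body folds, under their proof-side names
def pvInner (st : PySem.Set String × List String) (v : String) :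
    PySem.Set String × List String :=
  if PySem.Set.contains st.1 v then st else (PySem.Set.add st.1 v, st.2 ++ [v])

def pvOuter (grafo : List (String × List String)) (st : PySem.Set String × List String)
    (u : String) : PySem.Set String × List String :=
  (pvAdj grafo u).foldl pvInner st


-- ---- generic lemmas ----

theorem pvSetContains_iff (s : PySem.Set String) (x : String) :
    PySem.Set.contains s x = true ↔ x ∈ s := by
  simp [PySem.Set.contains]

theorem pvSetAdd_fresh (s : PySem.Set String) (x : String) (h : PySem.Set.contains s x = false) :
    PySem.Set.add s x = s ++ [x] := by
  have hx : x ∉ s := by simpa [PySem.Set.contains] using h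
  simp [PySem.Set.add, hx]


theorem pvAdj_cons (p : String × List String) (rest : List (String × List String)) (u : String) :
    pvAdj (p :: rest) u = if p.1 == u then p.2 else pvAdj rest u := by
  rw [pvAdj, PySem.Dict.getD_eq_get?_getD, PySem.Dict.get?_mk_cons]
  by_cases h : (p.1 == u) = true
  · simp [h]
  · simp only [h]; simp only [Bool.false_eq_true, if_false]
    rw [pvAdj, PySem.Dict.getD_eq_get?_getD]

theorem pvAdj_subset (grafo : List (String × List String)) (u v : String)
    (h : v ∈ pvAdj grafo u) : v ∈ grafo.flatMap (fun p => p.2) := by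
  induction grafo with
  | nil => simp [pvAdj, PySem.Dict.getD_eq_get?_getD] at h;
           cases h
  | cons p rest ih =>
      rw [pvAdj_cons] at h
      rw [List.flatMap_cons]
      by_cases hp : (p.1 == u) = true
      · simp [hp] at h; exact List.mem_append_left _ h
      · simp [hp] at h; exact List.mem_append_right _ (ih h)

theorem pvAdjSum_le (grafo : List (String × List String)) (l : List String) (hl : l.Nodup) :
    (l.map (fun u => (pvAdj grafo u).length)).sum ≤ (grafo.map (fun p => p.2.length)).sum := by
  induction grafo generalizing l with
  | nil =>
      have : ∀ u ∈ l, (pvAdj [] u).length = 0 := by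
        intro u _; simp [pvAdj, PySem.Dict.getD_eq_get?_getD]; rfl
      have h0 : l.map (fun u => (pvAdj [] u).length) = l.map (fun _ => 0) :=
        List.map_congr_left (by intro u hu; simp [this u hu])
      simp [h0]
  | cons p rest ih =>
      by_cases hp : p.1 ∈ l
      · have hperm : l.Perm (p.1 :: l.erase p.1) := List.perm_cons_erase hp
        have hsum : (l.map (fun u => (pvAdj (p :: rest) u).length)).sum
            = ((p.1 :: l.erase p.1).map (fun u => (pvAdj (p :: rest) u).length)).sum :=
          (hperm.map _).sum_eq
        rw [hsum]
        have hne : ∀ x ∈ l.erase p.1, x ≠ p.1 := by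
          intro x hx
          exact (List.Nodup.mem_erase_iff hl).1 hx |>.1
        have hcong : (l.erase p.1).map (fun u => (pvAdj (p :: rest) u).length)
            = (l.erase p.1).map (fun u => (pvAdj rest u).length) := by
          apply List.map_congr_left
          intro x hx
          rw [pvAdj_cons]
          have : (p.1 == x) = false := by
            simp; exact fun h => (hne x hx) h.symm
          simp [this]
        have := ih (l.erase p.1) (hl.erase _)
        rw [List.map_cons, List.sum_cons, hcong, pvAdj_cons]
        simp only [beq_self_eq_true, if_true, List.map_cons, List.sum_cons]
        omega
      · have hcong : l.map (fun u => (pvAdj (p :: rest) u).length)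
            = l.map (fun u => (pvAdj rest u).length) := by
          apply List.map_congr_left
          intro x hx
          rw [pvAdj_cons]
          have : (p.1 == x) = false := by
            simp; exact fun h => hp (h ▸ hx)
          simp [this]
        rw [hcong]
        have := ih l hl
        simp only [List.map_cons, List.sum_cons]
        omega

theorem pvFilterSum_erase (l : List String) (hn : l.Nodup) (u : String) (hu : u ∈ l)
    (f : String → Nat) (p q : String → Bool) (hpq : ∀ x, x ≠ u → p x = q x)
    (hp : p u = true) (hq : q u = false) :
    ((l.filter p).map f).sum = f u + ((l.filter q).map f).sum := by
  induction l with
  | nil => cases hu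
  | cons a t ih =>
      rcases List.nodup_cons.1 hn with ⟨hat, hnt⟩
      by_cases hau : a = u
      · subst hau
        have hcong : t.filter p = t.filter q := by
          apply List.filter_congr
          intro x hx
          exact hpq x (fun h => hat (h ▸ hx))
        simp [List.filter_cons, hp, hq, hcong]
      · rcases List.mem_cons.1 hu with h | h
        · exact (hau h.symm).elim
        · have := ih hnt h
          have hpa : p a = q a := hpq a hau
          by_cases hqa : q a = true
          · simp [List.filter_cons, hqa, hpa ▸ hqa, this]
            omega
          · have hqa' : q a = false := by simpa using hqa
            simp [List.filter_cons, hqa', hpa ▸ hqa', this]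

theorem pvFilterSum_mono (l : List String) (f : String → Nat) (p q : String → Bool)
    (h : ∀ x, q x = true → p x = true) :
    ((l.filter q).map f).sum ≤ ((l.filter p).map f).sum := by
  induction l with
  | nil => simp
  | cons a t ih =>
      by_cases hqa : q a = true
      · simp [List.filter_cons, hqa, h a hqa]; omega
      · have hqa' : q a = false := by simpa using hqa
        by_cases hpa : p a = true
        · simp [List.filter_cons, hqa', hpa]; omega
        · have hpa' : p a = false := by simpa using hpa
          simp [List.filter_cons, hqa', hpa']; omega

theorem pvFilterLen_mono (l : List String) (p q : String → Bool)
    (h : ∀ x, q x = true → p x = true) :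
    (l.filter q).length ≤ (l.filter p).length := by
  induction l with
  | nil => simp
  | cons a t ih =>
      by_cases hqa : q a = true
      · simp [List.filter_cons, hqa, h a hqa]; omega
      · have hqa' : q a = false := by simpa using hqa
        by_cases hpa : p a = true
        · simp [List.filter_cons, hqa', hpa]; omega
        · have hpa' : p a = false := by simpa using hpa
          simp [List.filter_cons, hqa', hpa']; exact ih

theorem pvFilterLen_lt (l : List String) (p q : String → Bool)
    (h : ∀ x, q x = true → p x = true) (x0 : String) (hx0 : x0 ∈ l)
    (hp : p x0 = true) (hq : q x0 = false) :
    (l.filter q).length < (l.filter p).length := by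
  induction l with
  | nil => cases hx0
  | cons a t ih =>
      by_cases hax : a = x0
      · subst hax
        have hm := pvFilterLen_mono t p q h
        simp [List.filter_cons, hp, hq]; omega
      · rcases List.mem_cons.1 hx0 with h' | h'
        · exact absurd h'.symm hax
        · have := ih h'
          by_cases hqa : q a = true
          · simp [List.filter_cons, hqa, h a hqa]; omega
          · have hqa' : q a = false := by simpa using hqa
            by_cases hpa : p a = true
            · simp [List.filter_cons, hqa', hpa]; omega
            · have hpa' : p a = false := by simpa using hpa
              simp [List.filter_cons, hqa', hpa']; omega

theorem pvContains_get?_none (V : PySem.Dict String Int) (u : String)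
    (h : V.contains u = false) : V.get? u = none := by
  have := PySem.Dict.contains_eq_isSome_get? V u
  rw [h] at this
  cases hg : V.get? u with
  | none => rfl
  | some v => rw [hg] at this; simp at this

theorem pvContains_get?_some (V : PySem.Dict String Int) (u : String)
    (h : V.contains u = true) : ∃ gv, V.get? u = some gv := by
  have := PySem.Dict.contains_eq_isSome_get? V u
  rw [h] at this
  cases hg : V.get? u with
  | none => rw [hg] at this; simp at this
  | some v => exact ⟨v, rfl⟩

theorem pvHeapPush_append (A B : List (Int × Int × String)) (e : Int × Int × String)
    (h : ∀ x ∈ A, pvEntLe x e = true) : pvHeapPush (A ++ B) e = A ++ pvHeapPush B e := by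
  induction A with
  | nil => simp
  | cons a t ih =>
      have ha : pvEntLe a e = true := h a (List.mem_cons_self ..)
      simp only [List.cons_append, pvHeapPush, ha, if_true]
      rw [ih (fun x hx => h x (List.mem_cons_of_mem _ hx))]

theorem pvEntLe_lt (pm d d' : Int) (x v : String) (h : d < d') :
    pvEntLe (pvEnt pm d x) (pvEnt pm d' v) = true := by
  simp [pvEntLe, pvEnt, h]

theorem pvEntLe_eq (pm d : Int) (x v : String) :
    pvEntLe (pvEnt pm d x) (pvEnt pm d v) = decide (x.toList ≤ v.toList) := by
  simp [pvEntLe, pvEnt]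

theorem pvHeapPush_map (pm d : Int) (P : List String) (v : String) :
    pvHeapPush (P.map (pvEnt pm d)) (pvEnt pm d v) = (pvInsStr P v).map (pvEnt pm d) := by
  induction P with
  | nil => simp [pvHeapPush, pvInsStr]
  | cons x t ih =>
      simp only [List.map_cons, pvHeapPush, pvInsStr, pvEntLe_eq]
      by_cases hle : x.toList ≤ v.toList
      · simp [hle, ih]
      · simp [hle]

theorem pvInsStr_mem (P : List String) (v x : String) :
    x ∈ pvInsStr P v ↔ x = v ∨ x ∈ P := by
  induction P with
  | nil => simp [pvInsStr]
  | cons a t ih =>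
      simp only [pvInsStr]
      by_cases hle : a.toList ≤ v.toList
      · simp [hle, ih]; tauto
      · simp [hle]

theorem pvInsStr_sorted (P : List String) (v : String)
    (h : P.Pairwise (fun a b => a.toList ≤ b.toList)) :
    (pvInsStr P v).Pairwise (fun a b => a.toList ≤ b.toList) := by
  induction P with
  | nil => simp [pvInsStr]
  | cons a t ih =>
      rcases List.pairwise_cons.1 h with ⟨ha, ht⟩
      simp only [pvInsStr]
      by_cases hle : a.toList ≤ v.toList
      · simp only [hle, if_true]
        apply List.pairwise_cons.2
        refine ⟨?_, ih ht⟩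
        intro b hb
        rcases (pvInsStr_mem t v b).1 hb with rfl | hbt
        · exact hle
        · exact ha b hbt
      · simp only [hle, if_false]
        have hva : v.toList ≤ a.toList := le_of_not_ge hle
        apply List.pairwise_cons.2
        refine ⟨?_, h⟩
        intro b hb
        rcases List.mem_cons.1 hb with rfl | hbt
        · exact hva
        · exact le_trans hva (ha b hbt)

theorem pvPushNames_mem (P l : List String) (x : String) :
    x ∈ pvPushNames P l ↔ x ∈ P ∨ x ∈ l := by
  induction l generalizing P with
  | nil => simp [pvPushNames]
  | cons a t ih =>
      simp only [pvPushNames, List.foldl_cons]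
      rw [show (List.foldl pvInsStr (pvInsStr P a) t) = pvPushNames (pvInsStr P a) t from rfl, ih]
      rw [pvInsStr_mem]
      simp; tauto

theorem pvPushNames_sorted (P l : List String)
    (h : P.Pairwise (fun a b => a.toList ≤ b.toList)) :
    (pvPushNames P l).Pairwise (fun a b => a.toList ≤ b.toList) := by
  induction l generalizing P with
  | nil => exact h
  | cons a t ih =>
      simp only [pvPushNames, List.foldl_cons]
      exact ih _ (pvInsStr_sorted P a h)

theorem pvFoldPush_append (pm d : Int) (l M P : List String) :
    l.foldl (fun h v => pvHeapPush h (pvEnt pm (d + 1) v))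
        (M.map (pvEnt pm d) ++ P.map (pvEnt pm (d + 1)))
      = M.map (pvEnt pm d) ++ (pvPushNames P l).map (pvEnt pm (d + 1)) := by
  induction l generalizing P with
  | nil => simp [pvPushNames]
  | cons v t ih =>
      simp only [List.foldl_cons]
      rw [pvHeapPush_append _ _ _ (by
        intro x hx
        rcases List.mem_map.1 hx with ⟨u, _, rfl⟩
        exact pvEntLe_lt pm d (d+1) u v (by omega))]
      rw [pvHeapPush_map]
      exact ih (pvInsStr P v)

theorem pvHeapPush_length (h : List (Int × Int × String)) (e : Int × Int × String) :
    (pvHeapPush h e).length = h.length + 1 := by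
  induction h with
  | nil => rfl
  | cons x t ih => simp only [pvHeapPush]; split <;> simp [ih]

theorem pvFoldPush_length (e : String → Int × Int × String) (l : List String)
    (S : List (Int × Int × String)) :
    (l.foldl (fun h v => pvHeapPush h (e v)) S).length = S.length + l.length := by
  induction l generalizing S with
  | nil => rfl
  | cons v t ih => simp [List.foldl_cons, ih, pvHeapPush_length]; omega

theorem pvRest_insert_mono (grafo : List (String × List String)) (ni : String)
    (V : PySem.Dict String Int) (u : String) (g : Int) :
    pvRest grafo ni (V.insert u g) ≤ pvRest grafo ni V := by
  apply pvFilterSum_mono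
  intro x hx
  simp only [Bool.not_eq_eq_eq_not, Bool.not_true] at hx ⊢
  rw [PySem.Dict.contains_insert] at hx
  exact (Bool.or_eq_false_iff.1 hx).2

theorem pvRest_insert_fresh (grafo : List (String × List String)) (ni : String)
    (V : PySem.Dict String Int) (u : String) (g : Int)
    (hu : u ∈ pvU grafo ni) (hc : V.contains u = false) :
    pvRest grafo ni V = (pvAdj grafo u).length + pvRest grafo ni (V.insert u g) := by
  apply pvFilterSum_erase _ (List.nodup_dedup _) u (List.mem_dedup.2 hu)
  · intro x hx
    simp only [Bool.not_eq_eq_eq_not]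
    rw [PySem.Dict.contains_insert]
    have : (x == u) = false := by simpa using hx
    simp [this]
  · simp [hc]
  · simp [PySem.Dict.contains_insert_self]

theorem pvRunsA_nil (grafo : List (String × List String)) (ni : String) (pm : Int)
    (V : PySem.Dict String Int) (res : PySem.Set String) :
    pvRunsA grafo ni pm [] V res res := by
  intro fuel _
  cases fuel <;> rfl

theorem pvRunsA_skip (grafo : List (String × List String)) (ni : String) (pm f g : Int)
    (u : String) (S : List (Int × Int × String)) (V : PySem.Dict String Int)
    (res : PySem.Set String) (out : List String) (gv : Int)
    (hg : V.get? u = some gv) (hle : gv ≤ g)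
    (h : pvRunsA grafo ni pm S V res out) :
    pvRunsA grafo ni pm ((f, g, u) :: S) V res out := by
  intro fuel hfuel
  have h1 : 1 ≤ fuel := by
    have : 1 ≤ pvPotA grafo ni V ((f, g, u) :: S) := by simp [pvPotA]; omega
    omega
  obtain ⟨f', rfl⟩ : ∃ f', fuel = f' + 1 := ⟨fuel - 1, by omega⟩
  simp only [pvLoopA, hg, hle, decide_true, if_true]
  apply h
  simp only [pvPotA, List.length_cons] at hfuel ⊢
  omega

theorem pvRunsA_final (grafo : List (String × List String)) (ni : String) (pm f : Int)
    (u : String) (S : List (Int × Int × String)) (V : PySem.Dict String Int)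
    (res : PySem.Set String) (out : List String)
    (hg : V.get? u = none)
    (h : pvRunsA grafo ni pm S (V.insert u pm) (PySem.Set.add res u) out) :
    pvRunsA grafo ni pm ((f, pm, u) :: S) V res out := by
  intro fuel hfuel
  have h1 : 1 ≤ fuel := by
    have : 1 ≤ pvPotA grafo ni V ((f, pm, u) :: S) := by simp [pvPotA]; omega
    omega
  obtain ⟨f', rfl⟩ : ∃ f', fuel = f' + 1 := ⟨fuel - 1, by omega⟩
  simp only [pvLoopA, hg, if_false, beq_self_eq_true, if_true]
  apply h
  have hmono := pvRest_insert_mono grafo ni V u pm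
  simp only [pvPotA, List.length_cons] at hfuel ⊢
  omega

theorem pvRunsA_expand (grafo : List (String × List String)) (ni : String) (pm f g : Int)
    (u : String) (S : List (Int × Int × String)) (V : PySem.Dict String Int)
    (res : PySem.Set String) (out : List String)
    (hg : V.get? u = none) (hne : g ≠ pm) (hu : u ∈ pvU grafo ni)
    (h : pvRunsA grafo ni pm
          ((pvAdj grafo u).foldl (fun h v => pvHeapPush h (pvEnt pm (g + 1) v)) S)
          (V.insert u g) res out) :
    pvRunsA grafo ni pm ((f, g, u) :: S) V res out := by
  intro fuel hfuel
  have h1 : 1 ≤ fuel := by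
    have : 1 ≤ pvPotA grafo ni V ((f, g, u) :: S) := by simp [pvPotA]; omega
    omega
  obtain ⟨f', rfl⟩ : ∃ f', fuel = f' + 1 := ⟨fuel - 1, by omega⟩
  have hbeq : (g == pm) = false := by simpa using hne
  simp only [pvLoopA, hg, if_false, hbeq]
  have hfun : (fun (h : List (Int × Int × String)) v =>
      pvHeapPush h (g + 1 + (pm - (g + 1)), g + 1, v))
      = (fun h v => pvHeapPush h (pvEnt pm (g + 1) v)) := by
    funext h v
    have : g + 1 + (pm - (g + 1)) = pm := by ring
    rw [this]; rfl
  rw [hfun]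
  apply h
  have hc : V.contains u = false := by
    rw [PySem.Dict.contains_eq_isSome_get?, hg]; rfl
  have hfr := pvRest_insert_fresh grafo ni V u g hu hc
  simp only [pvPotA, List.length_cons, pvFoldPush_length] at hfuel ⊢
  omega

theorem pvRunsA_drain (grafo : List (String × List String)) (ni : String) (pm d : Int)
    (M : List String) (V : PySem.Dict String Int) (res : PySem.Set String)
    (h : ∀ u ∈ M, ∃ gv, V.get? u = some gv ∧ gv ≤ d) :
    pvRunsA grafo ni pm (M.map (pvEnt pm d)) V res res := by
  induction M with
  | nil => rw [List.map_nil]; exact pvRunsA_nil grafo ni pm V res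
  | cons u t ih =>
      rcases h u (List.mem_cons_self ..) with ⟨gv, hgv, hle⟩
      rw [List.map_cons]
      exact pvRunsA_skip grafo ni pm pm d u _ V res res gv hgv hle
        (ih (fun x hx => h x (List.mem_cons_of_mem _ hx)))

theorem pvRoundA (grafo : List (String × List String)) (ni : String) (pm d : Int) (hdp : d ≠ pm) :
    ∀ (M P : List String) (V : PySem.Dict String Int) (res : PySem.Set String) (out : List String),
    (∀ u gv, V.get? u = some gv → gv ≤ d) →
    (∀ u ∈ M, u ∈ pvU grafo ni) →
    pvRunsA grafo ni pm ((pvRound grafo d M V P).2.map (pvEnt pm (d + 1)))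
      (pvRound grafo d M V P).1 res out →
    pvRunsA grafo ni pm (M.map (pvEnt pm d) ++ P.map (pvEnt pm (d + 1))) V res out := by
  intro M
  induction M with
  | nil =>
      intro P V res out _ _ h
      simpa [pvRound] using h
  | cons u t ih =>
      intro P V res out hvals hM h
      rw [List.map_cons, List.cons_append]
      by_cases hc : V.contains u = true
      · simp only [pvRound, hc, if_true] at h
        rcases pvContains_get?_some V u hc with ⟨gv, hgv⟩
        exact pvRunsA_skip grafo ni pm pm d u _ V res out gv hgv (hvals u gv hgv)
          (ih P V res out hvals (fun x hx => hM x (List.mem_cons_of_mem _ hx)) h)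
      · have hc' : V.contains u = false := by simpa using hc
        have hg := pvContains_get?_none V u hc'
        simp only [pvRound, hc', Bool.false_eq_true, if_false] at h
        apply pvRunsA_expand grafo ni pm pm d u _ V res out hg hdp (hM u (List.mem_cons_self ..))
        rw [pvFoldPush_append]
        exact ih (pvPushNames P (pvAdj grafo u)) (V.insert u d) res out
          (by
            intro u' gv hgv
            rw [PySem.Dict.get?_insert] at hgv
            split at hgv
            · cases hgv; omega
            · exact hvals u' gv hgv)
          (fun x hx => hM x (List.mem_cons_of_mem _ hx)) h

theorem pvRound_fst_contains (grafo : List (String × List String)) (d : Int) :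
    ∀ (M P : List String) (V : PySem.Dict String Int) (x : String),
    ((pvRound grafo d M V P).1.contains x = true ↔ x ∈ M ∨ V.contains x = true) := by
  intro M
  induction M with
  | nil => intro P V x; simp [pvRound]
  | cons u t ih =>
      intro P V x
      by_cases hc : V.contains u = true
      · simp only [pvRound, hc, if_true]
        rw [ih]
        constructor
        · rintro (h | h)
          · exact Or.inl (List.mem_cons_of_mem _ h)
          · exact Or.inr h
        · rintro (h | h)
          · rcases List.mem_cons.1 h with rfl | h
            · exact Or.inr hc
            · exact Or.inl h
          · exact Or.inr h
      · have hc' : V.contains u = false := by simpa using hc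
        simp only [pvRound, hc', Bool.false_eq_true, if_false]
        rw [ih]
        rw [PySem.Dict.contains_insert]
        constructor
        · rintro (h | h)
          · exact Or.inl (List.mem_cons_of_mem _ h)
          · rcases Bool.or_eq_true_iff.1 h with h | h
            · exact Or.inl (by simpa using (List.mem_cons.2 (Or.inl (by simpa using h))))
            · exact Or.inr h
        · rintro (h | h)
          · rcases List.mem_cons.1 h with rfl | h
            · exact Or.inr (by simp)
            · exact Or.inl h
          · exact Or.inr (by simp [h])

theorem pvRound_fst_vals (grafo : List (String × List String)) (d : Int) :
    ∀ (M P : List String) (V : PySem.Dict String Int),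
    (∀ u gv, V.get? u = some gv → gv ≤ d) →
    (∀ u gv, (pvRound grafo d M V P).1.get? u = some gv → gv ≤ d) := by
  intro M
  induction M with
  | nil => intro P V h; simpa [pvRound] using h
  | cons u t ih =>
      intro P V h
      by_cases hc : V.contains u = true
      · simp only [pvRound, hc, if_true]; exact ih P V h
      · have hc' : V.contains u = false := by simpa using hc
        simp only [pvRound, hc', Bool.false_eq_true, if_false]
        apply ih
        intro u' gv hgv
        rw [PySem.Dict.get?_insert] at hgv
        split at hgv
        · cases hgv; omega
        · exact h u' gv hgv

theorem pvRound_fst_nodup (grafo : List (String × List String)) (d : Int) :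
    ∀ (M P : List String) (V : PySem.Dict String Int),
    V.keys.Nodup → (pvRound grafo d M V P).1.keys.Nodup := by
  intro M
  induction M with
  | nil => intro P V h; simpa [pvRound] using h
  | cons u t ih =>
      intro P V h
      by_cases hc : V.contains u = true
      · simp only [pvRound, hc, if_true]; exact ih P V h
      · have hc' : V.contains u = false := by simpa using hc
        simp only [pvRound, hc', Bool.false_eq_true, if_false]
        exact ih _ _ (PySem.Dict.nodup_keys_insert _ _ _ h)

theorem pvRound_snd_mem (grafo : List (String × List String)) (d : Int) :
    ∀ (M P : List String) (V : PySem.Dict String Int) (x : String),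
    (x ∈ (pvRound grafo d M V P).2 ↔
      x ∈ P ∨ ∃ u, u ∈ M ∧ V.contains u = false ∧ x ∈ pvAdj grafo u) := by
  intro M
  induction M with
  | nil => intro P V x; simp [pvRound]
  | cons u t ih =>
      intro P V x
      by_cases hc : V.contains u = true
      · simp only [pvRound, hc, if_true]
        rw [ih]
        constructor
        · rintro (h | ⟨u', hu', hcu', hx⟩)
          · exact Or.inl h
          · exact Or.inr ⟨u', List.mem_cons_of_mem _ hu', hcu', hx⟩
        · rintro (h | ⟨u', hu', hcu', hx⟩)
          · exact Or.inl h
          · rcases List.mem_cons.1 hu' with rfl | hu'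
            · rw [hc] at hcu'; cases hcu'
            · exact Or.inr ⟨u', hu', hcu', hx⟩
      · have hc' : V.contains u = false := by simpa using hc
        simp only [pvRound, hc', Bool.false_eq_true, if_false]
        rw [ih, pvPushNames_mem]
        constructor
        · rintro ((h | h) | ⟨u', hu', hcu', hx⟩)
          · exact Or.inl h
          · exact Or.inr ⟨u, List.mem_cons_self .., hc', h⟩
          · rw [PySem.Dict.contains_insert] at hcu'
            rcases Bool.or_eq_false_iff.1 hcu' with ⟨h1, h2⟩
            exact Or.inr ⟨u', List.mem_cons_of_mem _ hu', h2, hx⟩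
        · rintro (h | ⟨u', hu', hcu', hx⟩)
          · exact Or.inl (Or.inl h)
          · rcases List.mem_cons.1 hu' with rfl | hu'
            · exact Or.inl (Or.inr hx)
            · by_cases heq : u' = u
              · subst heq; exact Or.inl (Or.inr hx)
              · refine Or.inr ⟨u', hu', ?_, hx⟩
                rw [PySem.Dict.contains_insert, hcu']
                simp [heq]

theorem pvRound_snd_sorted (grafo : List (String × List String)) (d : Int) :
    ∀ (M P : List String) (V : PySem.Dict String Int),
    P.Pairwise (fun a b => a.toList ≤ b.toList) →
    (pvRound grafo d M V P).2.Pairwise (fun a b => a.toList ≤ b.toList) := by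
  intro M
  induction M with
  | nil => intro P V h; simpa [pvRound] using h
  | cons u t ih =>
      intro P V h
      by_cases hc : V.contains u = true
      · simp only [pvRound, hc, if_true]; exact ih P V h
      · have hc' : V.contains u = false := by simpa using hc
        simp only [pvRound, hc', Bool.false_eq_true, if_false]
        exact ih _ _ (pvPushNames_sorted _ _ h)

theorem pvRoundPm (grafo : List (String × List String)) (ni : String) (pm : Int) :
    ∀ (M : List String) (V : PySem.Dict String Int) (res : List String),
    (∀ u gv, V.get? u = some gv → gv ≤ pm) →
    (∀ r ∈ res, V.contains r = true) →
    pvRunsA grafo ni pm (M.map (pvEnt pm pm)) V res (pvEmit pm M V res) := by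
  intro M
  induction M with
  | nil =>
      intro V res _ _
      rw [List.map_nil]
      exact pvRunsA_nil grafo ni pm V res
  | cons u t ih =>
      intro V res hvals hres
      rw [List.map_cons]
      by_cases hc : V.contains u = true
      · rcases pvContains_get?_some V u hc with ⟨gv, hgv⟩
        simp only [pvEmit, hc, if_true]
        exact pvRunsA_skip grafo ni pm pm pm u _ V res _ gv hgv (hvals u gv hgv)
          (ih V res hvals hres)
      · have hc' : V.contains u = false := by simpa using hc
        have hg := pvContains_get?_none V u hc'
        simp only [pvEmit, hc', Bool.false_eq_true, if_false]
        apply pvRunsA_final grafo ni pm pm u _ V res _ hg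
        have hnr : PySem.Set.contains res u = false := by
          rw [← Bool.not_eq_true]
          intro hmem
          have := hres u ((pvSetContains_iff res u).1 hmem)
          rw [this] at hc'; cases hc'
        rw [pvSetAdd_fresh res u hnr]
        apply ih
        · intro u' gv hgv
          rw [PySem.Dict.get?_insert] at hgv
          split at hgv
          · cases hgv; omega
          · exact hvals u' gv hgv
        · intro r hr
          rcases List.mem_append.1 hr with hr | hr
          · rw [PySem.Dict.contains_insert, hres r hr]; simp
          · rcases List.mem_singleton.1 hr with rfl
            exact PySem.Dict.contains_insert_self ..

theorem pvEmit_spec (pm : Int) :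
    ∀ (M : List String) (V : PySem.Dict String Int) (res : List String),
    M.Pairwise (fun a b => a.toList ≤ b.toList) →
    res.Nodup →
    res.Pairwise (fun a b => a.toList < b.toList) →
    (∀ r ∈ res, V.contains r = true) →
    (∀ r ∈ res, ∀ m, m ∈ M → V.contains m = false → r.toList < m.toList) →
    (pvEmit pm M V res).Nodup ∧
    (pvEmit pm M V res).Pairwise (fun a b => a.toList < b.toList) ∧
    (∀ x, x ∈ pvEmit pm M V res ↔ x ∈ res ∨ (x ∈ M ∧ V.contains x = false)) := by
  intro M
  induction M with
  | nil =>
      intro V res _ hnd hpw _ _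
      exact ⟨by simpa [pvEmit] using hnd, by simpa [pvEmit] using hpw, by intro x; simp [pvEmit]⟩
  | cons u t ih =>
      intro V res hM hnd hpw hres hord
      rcases List.pairwise_cons.1 hM with ⟨hu, ht⟩
      by_cases hc : V.contains u = true
      · simp only [pvEmit, hc, if_true]
        have ihres := ih V res ht hnd hpw hres
          (fun r hr m hm hcm => hord r hr m (List.mem_cons_of_mem _ hm) hcm)
        refine ⟨ihres.1, ihres.2.1, ?_⟩
        intro x
        rw [ihres.2.2]
        constructor
        · rintro (h | ⟨hx, hcx⟩)
          · exact Or.inl h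
          · exact Or.inr ⟨List.mem_cons_of_mem _ hx, hcx⟩
        · rintro (h | ⟨hx, hcx⟩)
          · exact Or.inl h
          · rcases List.mem_cons.1 hx with rfl | hx
            · rw [hc] at hcx; cases hcx
            · exact Or.inr ⟨hx, hcx⟩
      · have hc' : V.contains u = false := by simpa using hc
        simp only [pvEmit, hc', Bool.false_eq_true, if_false]
        have hu_notin : u ∉ res := by
          intro hmem
          have := hres u hmem; rw [this] at hc'; cases hc'
        have hkey := ih (V.insert u pm) (res ++ [u]) ht
          (by
            rw [List.nodup_append]
            refine ⟨hnd, List.nodup_singleton u, ?_⟩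
            intro a ha b hb
            rcases List.mem_singleton.1 hb with rfl
            exact fun h => hu_notin (h ▸ ha))
          (by
            rw [List.pairwise_append]
            refine ⟨hpw, List.pairwise_singleton _ _, ?_⟩
            intro r hr b hb
            rcases List.mem_singleton.1 hb with rfl
            exact hord r hr b (List.mem_cons_self ..) hc')
          (by
            intro r hr
            rcases List.mem_append.1 hr with hr | hr
            · rw [PySem.Dict.contains_insert, hres r hr]; simp
            · rcases List.mem_singleton.1 hr with rfl
              exact PySem.Dict.contains_insert_self ..)
          (by
            intro r hr m hm hcm
            rw [PySem.Dict.contains_insert] at hcm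
            rcases Bool.or_eq_false_iff.1 hcm with ⟨hmu, hcm'⟩
            rcases List.mem_append.1 hr with hr | hr
            · exact hord r hr m (List.mem_cons_of_mem _ hm) hcm'
            · rcases List.mem_singleton.1 hr with rfl
              have hle : r.toList ≤ m.toList := hu m hm
              apply lt_of_le_of_ne hle
              intro heq
              have : r = m := String.toList_inj.1 heq
              subst this
              simp at hmu)
        refine ⟨hkey.1, hkey.2.1, ?_⟩
        intro x
        rw [hkey.2.2]
        constructor
        · rintro (h | ⟨hx, hcx⟩)
          · rcases List.mem_append.1 h with h | h
            · exact Or.inl h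
            · rcases List.mem_singleton.1 h with rfl
              exact Or.inr ⟨List.mem_cons_self .., hc'⟩
          · rw [PySem.Dict.contains_insert] at hcx
            rcases Bool.or_eq_false_iff.1 hcx with ⟨_, hcx'⟩
            exact Or.inr ⟨List.mem_cons_of_mem _ hx, hcx'⟩
        · rintro (h | ⟨hx, hcx⟩)
          · exact Or.inl (List.mem_append.2 (Or.inl h))
          · rcases List.mem_cons.1 hx with rfl | hx
            · exact Or.inl (List.mem_append.2 (Or.inr (List.mem_singleton.2 rfl)))
            · by_cases heq : x = u
              · subst heq
                exact Or.inl (List.mem_append.2 (Or.inr (List.mem_singleton.2 rfl)))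
              · refine Or.inr ⟨hx, ?_⟩
                rw [PySem.Dict.contains_insert, hcx]
                simp [heq]





theorem pvSetContains_false_iff (s : PySem.Set String) (x : String) :
    PySem.Set.contains s x = false ↔ x ∉ s := by
  constructor
  · intro h hm; rw [(pvSetContains_iff s x).2 hm] at h; cases h
  · intro h; rw [← Bool.not_eq_true]; intro h2; exact h ((pvSetContains_iff s x).1 h2)

theorem pvSetAdd_nodup (s : PySem.Set String) (x : String) (h : s.Nodup) :
    (PySem.Set.add s x).Nodup := by
  by_cases hc : PySem.Set.contains s x = true
  · have hm : x ∈ s := (pvSetContains_iff s x).1 hc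
    have : PySem.Set.add s x = s := by simp [PySem.Set.add, hm]
    rw [this]; exact h
  · have hc' : PySem.Set.contains s x = false := by simpa using hc
    rw [pvSetAdd_fresh s x hc']
    rw [List.nodup_append]
    refine ⟨h, List.nodup_singleton x, ?_⟩
    intro a ha b hb
    rcases List.mem_singleton.1 hb with rfl
    exact fun he => ((pvSetContains_false_iff _ _).1 hc') (he ▸ ha)

theorem pvSetAdd_mem (s : PySem.Set String) (x y : String) :
    y ∈ PySem.Set.add s x ↔ y = x ∨ y ∈ s := by
  by_cases hc : PySem.Set.contains s x = true
  · have hm : x ∈ s := (pvSetContains_iff s x).1 hc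
    have : PySem.Set.add s x = s := by simp [PySem.Set.add, hm]
    rw [this]
    constructor
    · exact Or.inr
    · rintro (rfl | h)
      · exact (pvSetContains_iff s y).1 hc
      · exact h
  · have hc' : PySem.Set.contains s x = false := by simpa using hc
    rw [pvSetAdd_fresh s x hc']
    simp [List.mem_append, or_comm]

theorem pvInnerB (l : List String) :
    ∀ (s : PySem.Set String) (acc : List String),
    (∀ a ∈ acc, a ∈ s) → acc.Nodup → s.Nodup →
    (∀ x, x ∈ (l.foldl pvInner (s, acc)).1 ↔ x ∈ s ∨ x ∈ l) ∧
    (∀ x, x ∈ (l.foldl pvInner (s, acc)).2 ↔ x ∈ acc ∨ (x ∉ s ∧ x ∈ l)) ∧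
    (l.foldl pvInner (s, acc)).2.Nodup ∧
    (∀ a ∈ (l.foldl pvInner (s, acc)).2, a ∈ (l.foldl pvInner (s, acc)).1) ∧
    (l.foldl pvInner (s, acc)).1.Nodup := by
  induction l with
  | nil =>
      intro s acc hsub hand hsn
      refine ⟨?_, ?_, hand, hsub, hsn⟩
      · intro x; simp
      · intro x; simp
  | cons v t ih =>
      intro s acc hsub hand hsn
      simp only [List.foldl_cons]
      by_cases hc : PySem.Set.contains s v = true
      · have hv : v ∈ s := (pvSetContains_iff s v).1 hc
        have hstep : pvInner (s, acc) v = (s, acc) := by simp [pvInner, hc, hv]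
        rw [hstep]
        rcases ih s acc hsub hand hsn with ⟨h1, h2, h3, h4, h5⟩
        refine ⟨?_, ?_, h3, h4, h5⟩
        · intro x; rw [h1]
          constructor
          · rintro (h | h)
            · exact Or.inl h
            · exact Or.inr (List.mem_cons_of_mem _ h)
          · rintro (h | h)
            · exact Or.inl h
            · rcases List.mem_cons.1 h with rfl | h
              · exact Or.inl hv
              · exact Or.inr h
        · intro x; rw [h2]
          constructor
          · rintro (h | ⟨hns, ht⟩)
            · exact Or.inl h
            · exact Or.inr ⟨hns, List.mem_cons_of_mem _ ht⟩
          · rintro (h | ⟨hns, ht⟩)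
            · exact Or.inl h
            · rcases List.mem_cons.1 ht with rfl | ht
              · exact (hns hv).elim
              · exact Or.inr ⟨hns, ht⟩
      · have hc' : PySem.Set.contains s v = false := by simpa using hc
        have hvs : v ∉ s := (pvSetContains_false_iff s v).1 hc'
        have hstep : pvInner (s, acc) v = (PySem.Set.add s v, acc ++ [v]) := by
          simp [pvInner, hc', hvs]
        rw [hstep]
        have hva : v ∉ acc := fun h => hvs (hsub v h)
        rcases ih (PySem.Set.add s v) (acc ++ [v])
          (by
            intro a ha
            rcases List.mem_append.1 ha with ha | ha
            · exact (pvSetAdd_mem s v a).2 (Or.inr (hsub a ha))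
            · rw [List.mem_singleton.1 ha]
              exact (pvSetAdd_mem _ _ _).2 (Or.inl rfl))
          (by
            rw [List.nodup_append]
            refine ⟨hand, List.nodup_singleton v, ?_⟩
            intro a ha b hb
            rcases List.mem_singleton.1 hb with rfl
            exact fun he => hva (he ▸ ha))
          (pvSetAdd_nodup s v hsn) with ⟨h1, h2, h3, h4, h5⟩
        refine ⟨?_, ?_, h3, h4, h5⟩
        · intro x; rw [h1, pvSetAdd_mem]
          constructor
          · rintro ((rfl | h) | h)
            · exact Or.inr (List.mem_cons_self ..)
            · exact Or.inl h
            · exact Or.inr (List.mem_cons_of_mem _ h)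
          · rintro (h | h)
            · exact Or.inl (Or.inr h)
            · rcases List.mem_cons.1 h with rfl | h
              · exact Or.inl (Or.inl rfl)
              · exact Or.inr h
        · intro x; rw [h2]
          constructor
          · rintro (h | ⟨hns, ht⟩)
            · rcases List.mem_append.1 h with h | h
              · exact Or.inl h
              · rcases List.mem_singleton.1 h with rfl
                exact Or.inr ⟨hvs, List.mem_cons_self ..⟩
            · rw [pvSetAdd_mem] at hns
              push_neg at hns
              exact Or.inr ⟨hns.2, List.mem_cons_of_mem _ ht⟩
          · rintro (h | ⟨hns, ht⟩)
            · exact Or.inl (List.mem_append.2 (Or.inl h))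
            · rcases List.mem_cons.1 ht with rfl | ht
              · exact Or.inl (List.mem_append.2 (Or.inr (List.mem_singleton.2 rfl)))
              · by_cases hxv : x = v
                · subst hxv
                  exact Or.inl (List.mem_append.2 (Or.inr (List.mem_singleton.2 rfl)))
                · refine Or.inr ⟨?_, ht⟩
                  rw [pvSetAdd_mem]
                  push_neg
                  exact ⟨hxv, hns⟩

theorem pvOuterB (grafo : List (String × List String)) (F : List String) :
    ∀ (s : PySem.Set String) (acc : List String),
    (∀ a ∈ acc, a ∈ s) → acc.Nodup → s.Nodup →
    (∀ x, x ∈ (F.foldl (pvOuter grafo) (s, acc)).1 ↔ x ∈ s ∨ ∃ u, u ∈ F ∧ x ∈ pvAdj grafo u) ∧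
    (∀ x, x ∈ (F.foldl (pvOuter grafo) (s, acc)).2 ↔
        x ∈ acc ∨ (x ∉ s ∧ ∃ u, u ∈ F ∧ x ∈ pvAdj grafo u)) ∧
    (F.foldl (pvOuter grafo) (s, acc)).2.Nodup ∧
    (∀ a ∈ (F.foldl (pvOuter grafo) (s, acc)).2, a ∈ (F.foldl (pvOuter grafo) (s, acc)).1) ∧
    (F.foldl (pvOuter grafo) (s, acc)).1.Nodup := by
  induction F with
  | nil =>
      intro s acc hsub hand hsn
      refine ⟨?_, ?_, hand, hsub, hsn⟩
      · intro x; simp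
      · intro x; simp
  | cons u F ih =>
      intro s acc hsub hand hsn
      simp only [List.foldl_cons]
      have hin := pvInnerB (pvAdj grafo u) s acc hsub hand hsn
      rcases hin with ⟨i1, i2, i3, i4, i5⟩
      have houter : pvOuter grafo (s, acc) u = (pvAdj grafo u).foldl pvInner (s, acc) := rfl
      rw [houter]
      rcases ih ((pvAdj grafo u).foldl pvInner (s, acc)).1
          ((pvAdj grafo u).foldl pvInner (s, acc)).2 i4 i3 i5 with ⟨o1, o2, o3, o4, o5⟩
      have hpair : (((pvAdj grafo u).foldl pvInner (s, acc)).1,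
          ((pvAdj grafo u).foldl pvInner (s, acc)).2) = (pvAdj grafo u).foldl pvInner (s, acc) := rfl
      rw [hpair] at o1 o2 o3 o4 o5
      refine ⟨?_, ?_, o3, o4, o5⟩
      · intro x; rw [o1, i1]
        constructor
        · rintro ((h | h) | ⟨u', hu', hx⟩)
          · exact Or.inl h
          · exact Or.inr ⟨u, List.mem_cons_self .., h⟩
          · exact Or.inr ⟨u', List.mem_cons_of_mem _ hu', hx⟩
        · rintro (h | ⟨u', hu', hx⟩)
          · exact Or.inl (Or.inl h)
          · rcases List.mem_cons.1 hu' with rfl | hu'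
            · exact Or.inl (Or.inr hx)
            · exact Or.inr ⟨u', hu', hx⟩
      · intro x; rw [o2, i2, i1]
        constructor
        · rintro ((h | ⟨hns, hx⟩) | ⟨hni, ⟨u', hu', hx⟩⟩)
          · exact Or.inl h
          · exact Or.inr ⟨hns, u, List.mem_cons_self .., hx⟩
          · push_neg at hni
            exact Or.inr ⟨hni.1, u', List.mem_cons_of_mem _ hu', hx⟩
        · rintro (h | ⟨hns, u', hu', hx⟩)
          · exact Or.inl (Or.inl h)
          · rcases List.mem_cons.1 hu' with rfl | hu'
            · exact Or.inl (Or.inr ⟨hns, hx⟩)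
            · by_cases hxu : x ∈ pvAdj grafo u
              · exact Or.inl (Or.inr ⟨hns, hxu⟩)
              · refine Or.inr ⟨?_, u', hu', hx⟩
                push_neg
                exact ⟨hns, hxu⟩

theorem pvRunsB_nil (grafo : List (String × List String)) (ni : String) (pm : Int)
    (vis : PySem.Set String) (d : Int) :
    pvRunsB grafo ni pm [] vis d [] := by
  intro fuel hfuel
  have : 1 ≤ fuel := by simp [pvPotB] at hfuel; omega
  obtain ⟨f, rfl⟩ : ∃ f, fuel = f + 1 := ⟨fuel - 1, by omega⟩
  rfl

theorem pvRunsB_final (grafo : List (String × List String)) (ni : String) (pm : Int)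
    (F : List String) (hF : F ≠ []) (vis : PySem.Set String) :
    pvRunsB grafo ni pm F vis pm (PySem.List.sorted F (fun x => x.toList) false) := by
  intro fuel hfuel
  have : 1 ≤ fuel := by simp [pvPotB] at hfuel; omega
  obtain ⟨f, rfl⟩ : ∃ f, fuel = f + 1 := ⟨fuel - 1, by omega⟩
  obtain ⟨a, t, rfl⟩ : ∃ a t, F = a :: t := by
    cases F with
    | nil => exact (hF rfl).elim
    | cons a t => exact ⟨a, t, rfl⟩
  simp [pvLoopB]

theorem pvRunsB_step_nil (grafo : List (String × List String)) (ni : String) (pm : Int)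
    (F : List String) (hF : F ≠ []) (vis : PySem.Set String) (d : Int) (hd : d ≠ pm)
    (hprox : (F.foldl (pvOuter grafo) (vis, [])).2 = []) :
    pvRunsB grafo ni pm F vis d [] := by
  intro fuel hfuel
  have h2 : 2 ≤ fuel := by simp [pvPotB] at hfuel; omega
  obtain ⟨f, rfl⟩ : ∃ f, fuel = f + 1 := ⟨fuel - 1, by omega⟩
  obtain ⟨a, t, rfl⟩ : ∃ a t, F = a :: t := by
    cases F with
    | nil => exact (hF rfl).elim
    | cons a t => exact ⟨a, t, rfl⟩
  have hbeq : (d == pm) = false := by simpa using hd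
  simp only [pvLoopB, hbeq, Bool.false_eq_true, if_false]
  have heq : ((a :: t).foldl (fun (st : PySem.Set String × List String) u =>
      (pvAdj grafo u).foldl (fun st v =>
        if PySem.Set.contains st.1 v then st
        else (PySem.Set.add st.1 v, st.2 ++ [v])) st) (vis, []))
      = (a :: t).foldl (pvOuter grafo) (vis, []) := rfl
  rw [heq, hprox]
  obtain ⟨f', rfl⟩ : ∃ f', f = f' + 1 := ⟨f - 1, by omega⟩
  rfl

theorem pvRunsB_step (grafo : List (String × List String)) (ni : String) (pm : Int)
    (F : List String) (hF : F ≠ []) (vis : PySem.Set String) (d : Int) (hd : d ≠ pm)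
    (out : List String) (x0 : String)
    (hx0p : x0 ∈ (F.foldl (pvOuter grafo) (vis, [])).2)
    (hx0U : x0 ∈ pvU grafo ni)
    (hx0v : x0 ∉ vis)
    (hx0v' : x0 ∈ (F.foldl (pvOuter grafo) (vis, [])).1)
    (hmono : ∀ x ∈ vis, x ∈ (F.foldl (pvOuter grafo) (vis, [])).1)
    (h : pvRunsB grafo ni pm (F.foldl (pvOuter grafo) (vis, [])).2
          (F.foldl (pvOuter grafo) (vis, [])).1 (d + 1) out) :
    pvRunsB grafo ni pm F vis d out := by
  intro fuel hfuel
  have hlt : pvCntB grafo ni (F.foldl (pvOuter grafo) (vis, [])).1 < pvCntB grafo ni vis := by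
    simp only [pvCntB]
    refine pvFilterLen_lt _ (fun u => !(PySem.Set.contains vis u))
      (fun u => !(PySem.Set.contains (F.foldl (pvOuter grafo) (vis, [])).1 u))
      ?_ x0 (List.mem_dedup.2 hx0U) ?_ ?_
    · intro x hx
      simp only [Bool.not_eq_true'] at hx ⊢
      rw [pvSetContains_false_iff] at hx ⊢
      exact fun hm => hx (hmono x hm)
    · simp only [Bool.not_eq_true']
      rw [pvSetContains_false_iff]
      exact hx0v
    · show (!(PySem.Set.contains (F.foldl (pvOuter grafo) (vis, [])).1 x0)) = false
      rw [(pvSetContains_iff _ _).2 hx0v']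
      rfl
  have h2 : 2 ≤ fuel := by simp [pvPotB] at hfuel; omega
  obtain ⟨f, rfl⟩ : ∃ f, fuel = f + 1 := ⟨fuel - 1, by omega⟩
  obtain ⟨a, t, rfl⟩ : ∃ a t, F = a :: t := by
    cases F with
    | nil => exact (hF rfl).elim
    | cons a t => exact ⟨a, t, rfl⟩
  have hbeq : (d == pm) = false := by simpa using hd
  simp only [pvLoopB, hbeq, Bool.false_eq_true, if_false]
  have heq : ((a :: t).foldl (fun (st : PySem.Set String × List String) u =>
      (pvAdj grafo u).foldl (fun st v =>
        if PySem.Set.contains st.1 v then st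
        else (PySem.Set.add st.1 v, st.2 ++ [v])) st) (vis, []))
      = (a :: t).foldl (pvOuter grafo) (vis, []) := rfl
  rw [heq]
  apply h
  simp only [pvPotB] at hfuel ⊢
  omega


theorem pvBaseEmpty (grafo : List (String × List String)) (ni : String) (pm d : Int)
    (M : List String) (V : PySem.Dict String Int) (vis : PySem.Set String)
    (h2 : ∀ x, x ∈ ([] : List String) ↔ (x ∈ M ∧ V.contains x = false))
    (h4 : ∀ u gv, V.get? u = some gv → gv < d) :
    ∃ out, pvRunsB grafo ni pm [] vis d out ∧
      pvRunsA grafo ni pm (M.map (pvEnt pm d)) V PySem.Set.empty out := by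
  refine ⟨[], pvRunsB_nil grafo ni pm vis d, ?_⟩
  have hdrain : ∀ u ∈ M, ∃ gv, V.get? u = some gv ∧ gv ≤ d := by
    intro u hu
    have hc : V.contains u = true := by
      by_cases hc : V.contains u = true
      · exact hc
      · have : u ∈ ([] : List String) := (h2 u).2 ⟨hu, by simpa using hc⟩
        cases this
    rcases pvContains_get?_some V u hc with ⟨gv, hgv⟩
    exact ⟨gv, hgv, le_of_lt (h4 u gv hgv)⟩
  exact pvRunsA_drain grafo ni pm d M V PySem.Set.empty hdrain

theorem pvBasePm (grafo : List (String × List String)) (ni : String) (pm : Int)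
    (M F : List String) (hF : F ≠ []) (V : PySem.Dict String Int) (vis : PySem.Set String)
    (h1 : M.Pairwise (fun a b => a.toList ≤ b.toList))
    (h2 : ∀ x, x ∈ F ↔ (x ∈ M ∧ V.contains x = false))
    (h2n : F.Nodup)
    (h4 : ∀ u gv, V.get? u = some gv → gv < pm) :
    ∃ out, pvRunsB grafo ni pm F vis pm out ∧
      pvRunsA grafo ni pm (M.map (pvEnt pm pm)) V PySem.Set.empty out := by
  have hvals : ∀ u gv, V.get? u = some gv → gv ≤ pm :=
    fun u gv h => le_of_lt (h4 u gv h)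
  have hrun := pvRoundPm grafo ni pm M V [] hvals (by intro r hr; cases hr)
  have hspec := pvEmit_spec pm M V [] h1 List.nodup_nil List.Pairwise.nil
    (by intro r hr; cases hr) (by intro r hr; cases hr)
  have hperm : (pvEmit pm M V []).Perm F := by
    refine (List.perm_ext_iff_of_nodup hspec.1 h2n).2 ?_
    intro x
    rw [hspec.2.2, h2 x]
    simp
  have hdec : (fun (a b : List Char) => a.decidableLT b)
      = (LinearOrder.toDecidableLT : DecidableLT (List Char)) := by
    funext a b; exact Subsingleton.elim _ _
  have hsort : PySem.List.sorted F (fun x => x.toList) false = pvEmit pm M V [] := by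
    rw [show (fun (a b : List Char) => a.decidableLT b)
      = (LinearOrder.toDecidableLT : DecidableLT (List Char)) from hdec]
    exact PySem.List.sorted_eq_of_perm_of_pairwise_lt F (pvEmit pm M V [])
      (fun x : String => x.toList) hperm hspec.2.1
  refine ⟨PySem.List.sorted F (fun x => x.toList) false,
    pvRunsB_final grafo ni pm F hF vis, ?_⟩
  rw [hsort]
  exact hrun

theorem pvMain (grafo : List (String × List String)) (ni : String) (pm : Int) :
    ∀ (n : Nat) (d : Int) (M F : List String) (V : PySem.Dict String Int) (vis : PySem.Set String),
    M.Pairwise (fun a b => a.toList ≤ b.toList) →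
    (∀ x, x ∈ F ↔ (x ∈ M ∧ V.contains x = false)) →
    F.Nodup →
    (∀ x, x ∈ vis ↔ (V.contains x = true ∨ x ∈ F)) →
    (∀ u gv, V.get? u = some gv → gv < d) →
    (∀ x ∈ M, x ∈ pvU grafo ni) →
    V.keys.Nodup →
    vis.Nodup →
    ((pvU grafo ni).dedup.filter (fun u => !(V.contains u))).length ≤ n →
    ∃ out, pvRunsB grafo ni pm F vis d out ∧
      pvRunsA grafo ni pm (M.map (pvEnt pm d)) V PySem.Set.empty out := by
  intro n
  induction n with
  | zero =>
      intro d M F V vis h1 h2 h2n h3 h4 h5 h6 h7 hn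
      cases hFe : F with
      | nil =>
          subst hFe
          exact pvBaseEmpty grafo ni pm d M V vis h2 h4
      | cons a t =>
          exfalso
          have haF : a ∈ F := by rw [hFe]; exact List.mem_cons_self ..
          have haM : a ∈ M := ((h2 a).1 haF).1
          have haV : V.contains a = false := ((h2 a).1 haF).2
          have haU : a ∈ (pvU grafo ni).dedup := List.mem_dedup.2 (h5 a haM)
          have : 0 < ((pvU grafo ni).dedup.filter (fun u => !(V.contains u))).length := by
            apply List.length_pos_of_mem
            · exact List.mem_filter.2 ⟨haU, by simp [haV]⟩
          omega
  | succ n ih =>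
      intro d M F V vis h1 h2 h2n h3 h4 h5 h6 h7 hn
      cases hFe : F with
      | nil =>
          subst hFe
          exact pvBaseEmpty grafo ni pm d M V vis h2 h4
      | cons a t =>
          have hFne : F ≠ [] := by rw [hFe]; exact List.cons_ne_nil a t
          rw [← hFe]
          by_cases hdp : d = pm
          · rw [hdp] at h4 ⊢
            exact pvBasePm grafo ni pm M F hFne V vis h1 h2 h2n h4
          -- advancing round: d ≠ pm
          · have hvals : ∀ u gv, V.get? u = some gv → gv ≤ d :=
              fun u gv h => le_of_lt (h4 u gv h)
            have hFM : ∀ x ∈ F, x ∈ M := fun x hx => ((h2 x).1 hx).1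
            have hFV : ∀ x ∈ F, V.contains x = false := fun x hx => ((h2 x).1 hx).2
            obtain ⟨o1, o2, o3, o4, o5⟩ := pvOuterB grafo F vis []
              (by intro a ha; cases ha) List.nodup_nil h7
            -- abbreviations
            have hRc := pvRound_fst_contains grafo d M [] V
            have hRm := pvRound_snd_mem grafo d M [] V
            -- next-state invariants
            have h1' := pvRound_snd_sorted grafo d M [] V List.Pairwise.nil
            have h2' : ∀ x, x ∈ (F.foldl (pvOuter grafo) (vis, [])).2 ↔
                (x ∈ (pvRound grafo d M V []).2 ∧
                  (pvRound grafo d M V []).1.contains x = false) := by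
              intro x
              rw [o2 x, pvRound_snd_mem]
              constructor
              · rintro (h | ⟨hnv, u, huF, hx⟩)
                · cases h
                · have hxnv : x ∉ vis := hnv
                  have hxnV : V.contains x = false := by
                    by_cases hc : V.contains x = true
                    · exact absurd ((h3 x).2 (Or.inl hc)) hxnv
                    · simpa using hc
                  have hxnF : x ∉ F := fun hxF => hxnv ((h3 x).2 (Or.inr hxF))
                  have hxnM : x ∉ M := fun hxM => hxnF ((h2 x).2 ⟨hxM, hxnV⟩)
                  refine ⟨Or.inr ⟨u, hFM u huF, hFV u huF, hx⟩, ?_⟩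
                  rw [← Bool.not_eq_true]
                  intro hc
                  rcases (pvRound_fst_contains grafo d M [] V x).1 hc with h | h
                  · exact hxnM h
                  · rw [hxnV] at h; cases h
              · rintro ⟨(h | ⟨u, huM, huV, hx⟩), hnc⟩
                · cases h
                · have hxnM : x ∉ M := by
                    intro hxM
                    have : (pvRound grafo d M V []).1.contains x = true :=
                      (pvRound_fst_contains grafo d M [] V x).2 (Or.inl hxM)
                    rw [hnc] at this; cases this
                  have hxnV : V.contains x = false := by
                    by_cases hc : V.contains x = true
                    · have : (pvRound grafo d M V []).1.contains x = true :=
                        (pvRound_fst_contains grafo d M [] V x).2 (Or.inr hc)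
                      rw [hnc] at this; cases this
                    · simpa using hc
                  have hxnF : x ∉ F := fun hxF => hxnM (hFM x hxF)
                  have hxnv : x ∉ vis := by
                    intro hv
                    rcases (h3 x).1 hv with h | h
                    · rw [hxnV] at h; cases h
                    · exact hxnF h
                  exact Or.inr ⟨hxnv, u, (h2 u).2 ⟨huM, huV⟩, hx⟩
            have h3' : ∀ x, x ∈ (F.foldl (pvOuter grafo) (vis, [])).1 ↔
                ((pvRound grafo d M V []).1.contains x = true ∨
                  x ∈ (F.foldl (pvOuter grafo) (vis, [])).2) := by
              intro x
              rw [o1 x]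
              constructor
              · rintro (h | ⟨u, huF, hx⟩)
                · rcases (h3 x).1 h with h | h
                  · exact Or.inl ((pvRound_fst_contains grafo d M [] V x).2 (Or.inr h))
                  · exact Or.inl ((pvRound_fst_contains grafo d M [] V x).2 (Or.inl (hFM x h)))
                · by_cases hv : x ∈ vis
                  · rcases (h3 x).1 hv with h | h
                    · exact Or.inl ((pvRound_fst_contains grafo d M [] V x).2 (Or.inr h))
                    · exact Or.inl ((pvRound_fst_contains grafo d M [] V x).2 (Or.inl (hFM x h)))
                  · exact Or.inr ((o2 x).2 (Or.inr ⟨hv, u, huF, hx⟩))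
              · rintro (h | h)
                · rcases (pvRound_fst_contains grafo d M [] V x).1 h with h | h
                  · by_cases hcx : V.contains x = true
                    · exact Or.inl ((h3 x).2 (Or.inl hcx))
                    · have : x ∈ F := (h2 x).2 ⟨h, by simpa using hcx⟩
                      exact Or.inl ((h3 x).2 (Or.inr this))
                  · exact Or.inl ((h3 x).2 (Or.inl h))
                · rcases (o2 x).1 h with h | ⟨hnv, u, huF, hx⟩
                  · cases h
                  · exact Or.inr ⟨u, huF, hx⟩
            have h4' : ∀ u gv, (pvRound grafo d M V []).1.get? u = some gv → gv < d + 1 := by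
              intro u gv hgv
              have := pvRound_fst_vals grafo d M [] V hvals u gv hgv
              omega
            have h5' : ∀ x ∈ (pvRound grafo d M V []).2, x ∈ pvU grafo ni := by
              intro x hx
              rcases (pvRound_snd_mem grafo d M [] V x).1 hx with h | ⟨u, _, _, hx'⟩
              · cases h
              · exact List.mem_cons_of_mem _ (pvAdj_subset grafo u x hx')
            have h6' := pvRound_fst_nodup grafo d M [] V h6
            -- measure strictly decreases
            have haF : a ∈ F := by rw [hFe]; exact List.mem_cons_self ..
            have hlt : ((pvU grafo ni).dedup.filter
                  (fun u => !((pvRound grafo d M V []).1.contains u))).length <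
                ((pvU grafo ni).dedup.filter (fun u => !(V.contains u))).length := by
              refine pvFilterLen_lt _ (fun u => !(V.contains u))
                (fun u => !((pvRound grafo d M V []).1.contains u)) ?_
                a (List.mem_dedup.2 (h5 a (hFM a haF))) ?_ ?_
              · intro x hx
                simp only [Bool.not_eq_true'] at hx ⊢
                rw [← Bool.not_eq_true] at hx ⊢
                intro hc
                exact hx ((pvRound_fst_contains grafo d M [] V x).2 (Or.inr hc))
              · simp [hFV a haF]
              · show (!((pvRound grafo d M V []).1.contains a)) = false
                rw [(pvRound_fst_contains grafo d M [] V a).2 (Or.inl (hFM a haF))]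
                rfl
            obtain ⟨out, hB, hA⟩ := ih (d + 1) (pvRound grafo d M V []).2
              (F.foldl (pvOuter grafo) (vis, [])).2 (pvRound grafo d M V []).1
              (F.foldl (pvOuter grafo) (vis, [])).1
              h1' h2' o3 h3' h4' h5' h6' o5 (by omega)
            refine ⟨out, ?_, ?_⟩
            · by_cases hpx : (F.foldl (pvOuter grafo) (vis, [])).2 = []
              · have e1 := hB (pvPotB grafo ni (F.foldl (pvOuter grafo) (vis, [])).1) le_rfl
                rw [hpx] at e1
                have e2 := pvRunsB_nil grafo ni pm (F.foldl (pvOuter grafo) (vis, [])).1 (d + 1)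
                  (pvPotB grafo ni (F.foldl (pvOuter grafo) (vis, [])).1) le_rfl
                have hout : out = [] := by rw [← e1, e2]
                rw [hout]
                exact pvRunsB_step_nil grafo ni pm F hFne vis d hdp hpx
              · obtain ⟨x0, hx0⟩ := List.exists_mem_of_ne_nil _ hpx
                rcases (o2 x0).1 hx0 with h | ⟨hx0v, u, huF, hx0a⟩
                · cases h
                · exact pvRunsB_step grafo ni pm F hFne vis d hdp out x0 hx0
                    (List.mem_cons_of_mem _ (pvAdj_subset grafo u x0 hx0a))
                    hx0v (o4 x0 hx0) (fun x hx => (o1 x).2 (Or.inl hx)) hB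
            · have hstep := pvRoundA grafo ni pm d hdp M [] V PySem.Set.empty out hvals h5 hA
              rw [List.map_nil, List.append_nil] at hstep
              exact hstep

theorem pvFlatLen (grafo : List (String × List String)) :
    (grafo.flatMap (fun p => p.2)).length = (grafo.map (fun p => p.2.length)).sum := by
  induction grafo with
  | nil => rfl
  | cons p rest ih => simp [List.flatMap_cons, ih]

-- ===== VERDICT (by name: the statement is the Claim_ definition above) =====
theorem busca_a_estrela_bfs_spec : Claim_equal_busca_a_estrela_bfs := by
  intro ni grafo pm _
  unfold Spec_busca_a_estrela_bfs
  obtain ⟨out, hB, hA⟩ := pvMain grafo ni pm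
    (((pvU grafo ni).dedup.filter
        (fun u => !((PySem.Dict.empty : PySem.Dict String Int).contains u))).length)
    0 [ni] [ni] PySem.Dict.empty (PySem.Set.add PySem.Set.empty ni)
    (List.pairwise_singleton _ _)
    (by intro x; simp [PySem.Dict.contains_empty])
    (List.nodup_singleton ni)
    (by intro x; rw [pvSetAdd_mem]; simp [PySem.Dict.contains_empty, PySem.Set.empty])
    (by intro u gv h; rw [PySem.Dict.get?_empty] at h; cases h)
    (by intro x hx; rw [List.mem_singleton.1 hx]; exact List.mem_cons_self ..)
    (by simpa using PySem.Dict.nodup_keys_empty)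
    (pvSetAdd_nodup _ _ List.nodup_nil)
    le_rfl
  have hrest0 : pvRest grafo ni PySem.Dict.empty ≤ (grafo.map (fun p => p.2.length)).sum := by
    unfold pvRest
    have hfe : ((pvU grafo ni).dedup.filter
        (fun u => !((PySem.Dict.empty : PySem.Dict String Int).contains u)))
        = (pvU grafo ni).dedup := by
      apply List.filter_eq_self.2
      intro a _
      simp [PySem.Dict.contains_empty]
    rw [hfe]
    exact pvAdjSum_le grafo _ (List.nodup_dedup _)
  have hcnt0 : pvCntB grafo ni (PySem.Set.add PySem.Set.empty ni)
      ≤ (grafo.map (fun p => p.2.length)).sum := by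
    unfold pvCntB
    have h1 : ((pvU grafo ni).dedup.filter
          (fun u => !(PySem.Set.contains (PySem.Set.add PySem.Set.empty ni) u))).length
        ≤ ((pvU grafo ni).filter
          (fun u => !(PySem.Set.contains (PySem.Set.add PySem.Set.empty ni) u))).length :=
      List.Sublist.length_le ((List.dedup_sublist _).filter _)
    have hni : (!(PySem.Set.contains (PySem.Set.add PySem.Set.empty ni) ni)) = false := by
      rw [(pvSetContains_iff _ _).2 ((pvSetAdd_mem _ _ _).2 (Or.inl rfl))]
      rfl
    have h2 : ((pvU grafo ni).filter
          (fun u => !(PySem.Set.contains (PySem.Set.add PySem.Set.empty ni) u)))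
        = ((grafo.flatMap (fun p => p.2)).filter
          (fun u => !(PySem.Set.contains (PySem.Set.add PySem.Set.empty ni) u))) := by
      show List.filter _ (ni :: _) = _
      rw [List.filter_cons]
      simp only [hni, Bool.false_eq_true, if_false]
    calc ((pvU grafo ni).dedup.filter
          (fun u => !(PySem.Set.contains (PySem.Set.add PySem.Set.empty ni) u))).length
        ≤ ((pvU grafo ni).filter
          (fun u => !(PySem.Set.contains (PySem.Set.add PySem.Set.empty ni) u))).length := h1
      _ = ((grafo.flatMap (fun p => p.2)).filter
          (fun u => !(PySem.Set.contains (PySem.Set.add PySem.Set.empty ni) u))).length := by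
            rw [h2]
      _ ≤ (grafo.flatMap (fun p => p.2)).length := List.length_filter_le _ _
      _ = (grafo.map (fun p => p.2.length)).sum := pvFlatLen grafo
  have hAv := hA ((grafo.map (fun p => p.2.length)).sum + 2)
    (by
      show pvPotA grafo ni PySem.Dict.empty ([ni].map (pvEnt pm 0)) ≤ _
      unfold pvPotA
      simp only [List.map_cons, List.map_nil, List.length_cons, List.length_nil]
      omega)
  have hBv := hB ((grafo.map (fun p => p.2.length)).sum + 2)
    (by
      show pvPotB grafo ni (PySem.Set.add PySem.Set.empty ni) ≤ _
      unfold pvPotB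
      omega)
  show busca_a_estrela_bfs ni grafo pm = busca_a_estrela_bfs_alt ni grafo pm
  unfold busca_a_estrela_bfs busca_a_estrela_bfs_alt
  rw [show (0 + (pm - 0) : Int) = pm from by ring]
  have hAv' : pvLoopA grafo pm ((grafo.map (fun p => p.2.length)).sum + 2)
      [(pm, 0, ni)] PySem.Dict.empty PySem.Set.empty = out := by
    simpa [pvEnt] using hAv
  rw [hAv', hBv]
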